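-- pv_equiv track=rewrite | github.com/payapprojects/thaienglishcorpus | aligner.py | check_weak
-- ===== SOURCE A (Python) =====
-- def check_weak(ordered,strong):
--
--     ordered = strong + ordered
--     strong = []
--     num1 = []
--     num2 = []
--     for pair in ordered:
--         num1.append(pair[0])
--         num2.append(pair[1])
--
--     duplicates1 = []
--     duplicates2 = []
--
--     for value in num1:
--       if num1.count(value) > 1:
--         if value not in duplicates1:
--           duplicates1.append(value)
--
--     for value in num2:
--       if num2.count(value) > 1:
--         if value not in duplicates2:
--           duplicates2.append(value)
--
--     weak = []
--     for pair in ordered: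
--         if pair[0] in duplicates1 or pair[1] in duplicates2:
--             weak.append(pair)
--         else:
--             strong.append(pair)
--
--     return weak,strong
-- ===== SOURCE B (Python) =====
-- def check_weak(ordered, strong):
--     # Index-group strategy: group pair POSITIONS by column value, mark positions
--     # belonging to a group of size > 1 in a boolean flag array, then split once by flag.
--     combined = strong + ordered
--     groups1 = {}
--     groups2 = {}
--     for i, pair in enumerate(combined):
--         groups1.setdefault(pair[0], []).append(i)
--         groups2.setdefault(pair[1], []).append(i)
--     weak_flag = [False] * len(combined)
--     for groups in (groups1, groups2):
--         for positions in groups.values():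
--             if len(positions) > 1:
--                 for i in positions:
--                     weak_flag[i] = True
--     weak = []
--     strong_out = []
--     for i, pair in enumerate(combined):
--         if weak_flag[i]:
--             weak.append(pair)
--         else:
--             strong_out.append(pair)
--     return weak, strong_out
-- ===== Notes on version B (the rewrite author's own statement) =====
-- stated objective: faster
-- what changed: Instead of testing each pair's values against quadratic duplicate lists, B groups pair POSITIONS by column value in two dicts, walks each group once marking positions of groups larger than one in a boolean flag array, and splits the list by flag in a single pass.
import Mathlib
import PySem

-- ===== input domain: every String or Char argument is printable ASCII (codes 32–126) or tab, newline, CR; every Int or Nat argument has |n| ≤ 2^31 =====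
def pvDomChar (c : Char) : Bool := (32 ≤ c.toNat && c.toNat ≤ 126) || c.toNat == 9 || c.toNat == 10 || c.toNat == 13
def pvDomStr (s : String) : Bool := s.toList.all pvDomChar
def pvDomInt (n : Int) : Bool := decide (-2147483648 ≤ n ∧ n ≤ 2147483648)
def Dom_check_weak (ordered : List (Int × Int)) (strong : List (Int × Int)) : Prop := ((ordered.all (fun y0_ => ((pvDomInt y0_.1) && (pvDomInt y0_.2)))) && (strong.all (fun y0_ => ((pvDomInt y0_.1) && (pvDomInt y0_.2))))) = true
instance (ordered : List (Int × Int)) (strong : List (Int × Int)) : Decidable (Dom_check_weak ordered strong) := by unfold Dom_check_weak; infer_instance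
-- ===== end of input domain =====

-- B replaces A's quadratic duplicate-value lists with position groups per column value,
-- a group-driven boolean flag array, and one flag-based split pass; objective: faster.

-- ===== PORT A =====
def check_weak (ordered : List (Int × Int)) (strong : List (Int × Int)) : (List (Int × Int)) × (List (Int × Int)) :=
  -- ordered = strong + ordered; strong = []
  let ordered1 := strong ++ ordered
  -- num1/num2 built by appending in a loop
  let num1 := ordered1.foldl (fun acc p => acc ++ [p.1]) []
  let num2 := ordered1.foldl (fun acc p => acc ++ [p.2]) []
  -- duplicates1/duplicates2: values occurring more than once, deduplicated by membership test
  let duplicates1 := num1.foldl (fun d v => if num1.count v > 1 then (if v ∈ d then d else d ++ [v]) else d) []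
  let duplicates2 := num2.foldl (fun d v => if num2.count v > 1 then (if v ∈ d then d else d ++ [v]) else d) []
  -- final split loop appending to weak or strong (strong starts at [])
  ordered1.foldl (fun ws p => if p.1 ∈ duplicates1 ∨ p.2 ∈ duplicates2 then (ws.1 ++ [p], ws.2) else (ws.1, ws.2 ++ [p])) ([], [])

-- ===== PORT B =====
def check_weak_alt (ordered : List (Int × Int)) (strong : List (Int × Int)) : (List (Int × Int)) × (List (Int × Int)) :=
  let combined := strong ++ ordered
  -- one enumerate pass groups pair POSITIONS by column value (setdefault(..,[]).append(i) = modify)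
  let gps := (PySem.List.enumerate combined).foldl
      (fun gs ip => (gs.1.modify ip.2.1 [] (· ++ [ip.1]), gs.2.modify ip.2.2 [] (· ++ [ip.1])))
      ((PySem.Dict.empty : PySem.Dict Int (List Int)), (PySem.Dict.empty : PySem.Dict Int (List Int)))
  -- weak_flag = [False] * len(combined); mark every position of a group of size > 1
  let flags0 := List.replicate combined.length false
  let flags1 := gps.1.values.foldl
      (fun fl ps => if ps.length > 1 then ps.foldl (fun fl j => PySem.List.pySetD fl j true) fl else fl) flags0
  let flags := gps.2.values.foldl
      (fun fl ps => if ps.length > 1 then ps.foldl (fun fl j => PySem.List.pySetD fl j true) fl else fl) flags1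
  -- single split pass driven by the flag array
  (PySem.List.enumerate combined).foldl
    (fun ws ip => if PySem.List.pyGetD flags ip.1 false then (ws.1 ++ [ip.2], ws.2) else (ws.1, ws.2 ++ [ip.2]))
    ([], [])

-- ===== PRECONDITION & SPEC =====
def Spec_check_weak (ordered : List (Int × Int)) (strong : List (Int × Int)) (out : (List (Int × Int)) × (List (Int × Int))) : Prop := out = check_weak_alt ordered strong
instance (ordered : List (Int × Int)) (strong : List (Int × Int)) (out : (List (Int × Int)) × (List (Int × Int))) : Decidable (Spec_check_weak ordered strong out) := by unfold Spec_check_weak; infer_instance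

-- ===== CLAIM (what is proved, stated in full; the proofs are below) =====
def Claim_equal_check_weak : Prop := ∀ (ordered : List (Int × Int)) (strong : List (Int × Int)), Dom_check_weak ordered strong → Spec_check_weak ordered strong (check_weak ordered strong)

-- ===== LEMMAS AND PROOFS =====

-- A's dedup-with-count loop: v ends up in the duplicates list iff it occurs in the
-- traversed list and occurs more than once in the reference list L.
theorem dup_mem (L : List Int) (xs : List Int) (init : List Int) (v : Int) :
    v ∈ xs.foldl (fun d w => if L.count w > 1 then (if w ∈ d then d else d ++ [w]) else d) init
      ↔ v ∈ init ∨ (v ∈ xs ∧ L.count v > 1) := by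
  induction xs generalizing init with
  | nil => simp
  | cons x t ih =>
    simp only [List.foldl_cons, ih, List.mem_cons]
    by_cases hc : L.count x > 1
    · by_cases hm : x ∈ init
      · simp only [if_pos hc, if_pos hm]
        constructor
        · rintro (h | h) <;> tauto
        · rintro (h | ⟨(h | h), hgt⟩) <;> subst_eqs <;> tauto
      · simp only [if_pos hc, if_neg hm, List.mem_append, List.mem_singleton]
        constructor
        · rintro ((h | h) | h) <;> subst_eqs <;> tauto
        · rintro (h | ⟨(h | h), hgt⟩) <;> subst_eqs <;> tauto
    · simp only [if_neg hc]
      constructor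
      · rintro (h | h) <;> tauto
      · rintro (h | ⟨(h | h), hgt⟩) <;> subst_eqs <;> tauto

-- B's grouping loop, keyed by k: each key's entry collects the first components (positions)
-- of the traversed (index, pair) list whose pair has key value v, in order.
theorem group_getD (k : Int × Int → Int) (l : List (Int × (Int × Int)))
    (d : PySem.Dict Int (List Int)) (v : Int) :
    (l.foldl (fun d ip => d.modify (k ip.2) [] (· ++ [ip.1])) d).getD v []
      = d.getD v [] ++ (l.filter (fun ip => k ip.2 == v)).map (·.1) := by
  induction l generalizing d with
  | nil => simp
  | cons x t ih =>
    simp only [List.foldl_cons, ih, List.filter_cons]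
    by_cases h : k x.2 = v
    · subst h
      simp [PySem.Dict.getD_modify_self]
    · rw [PySem.Dict.getD_modify_of_ne]
      · simp [h]
      · exact Ne.symm h

-- the inner marking loop: a fold of pySetD true over in-range nonnegative positions
theorem setfold_length (ps : List Int) (fl : List Bool) :
    (ps.foldl (fun fl j => PySem.List.pySetD fl j true) fl).length = fl.length := by
  induction ps generalizing fl with
  | nil => rfl
  | cons j t ih => simp [ih, PySem.List.length_pySetD]

theorem setfold_getD (ps : List Int) (fl : List Bool) (i : Nat)
    (hps : ∀ j ∈ ps, 0 ≤ j ∧ j.toNat < fl.length) :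
    (ps.foldl (fun fl j => PySem.List.pySetD fl j true) fl).getD i false
      = (fl.getD i false || decide ((i : Int) ∈ ps)) := by
  induction ps generalizing fl with
  | nil => simp
  | cons j t ih =>
    obtain ⟨hj0, hjl⟩ := hps j (by simp)
    have hj : j = ((j.toNat : Nat) : Int) := by omega
    simp only [List.foldl_cons]
    rw [ih _ (by intro x hx; simpa [PySem.List.length_pySetD] using hps x (by simp [hx]))]
    rw [hj, PySem.List.pySetD_natCast]
    simp only [List.getD_eq_getElem?_getD, List.getElem?_set]
    by_cases he : j.toNat = i
    · subst he
      simp [hjl, ← hj]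
    · have hne : (i : Int) ≠ j := by omega
      simp [he, Int.max_eq_left hj0, hne]

-- the outer marking loop over a list of groups
theorem markfold_length (G : List (List Int)) (fl : List Bool) :
    (G.foldl (fun fl ps => if ps.length > 1 then ps.foldl (fun fl j => PySem.List.pySetD fl j true) fl else fl) fl).length
      = fl.length := by
  induction G generalizing fl with
  | nil => rfl
  | cons ps t ih =>
    simp only [List.foldl_cons]
    rw [ih]
    split_ifs
    · exact setfold_length ps fl
    · rfl

theorem markfold_getD (G : List (List Int)) (fl : List Bool) (i : Nat)
    (hG : ∀ ps ∈ G, ∀ j ∈ ps, 0 ≤ j ∧ j.toNat < fl.length) :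
    (G.foldl (fun fl ps => if ps.length > 1 then ps.foldl (fun fl j => PySem.List.pySetD fl j true) fl else fl) fl).getD i false
      = (fl.getD i false || G.any (fun ps => decide (ps.length > 1) && decide ((i : Int) ∈ ps))) := by
  induction G generalizing fl with
  | nil => simp
  | cons ps t ih =>
    simp only [List.foldl_cons, List.any_cons]
    by_cases h : ps.length > 1
    · simp only [if_pos h]
      rw [ih _ (by intro x hx j hj; simpa [setfold_length] using hG x (by simp [hx]) j hj)]
      rw [setfold_getD ps fl i (hG ps (by simp))]
      simp [h, Bool.or_assoc]
    · simp only [if_neg h]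
      rw [ih _ (by intro x hx j hj; exact hG x (by simp [hx]) j hj)]
      simp [h]

-- the final split loop: folding over enumerate with an index-driven test equals
-- folding over the list with the pointwise-equivalent element test
theorem split_enum (l : List (Int × Int)) (s : Int)
    (acc : List (Int × Int) × List (Int × Int)) (F : Int → Bool)
    (q : Int × Int → Prop) [DecidablePred q]
    (h : ∀ (k : Nat) (hk : k < l.length), (F (s + k) = true ↔ q l[k])) :
    (PySem.List.enumerate l s).foldl
        (fun ws ip => if F ip.1 then (ws.1 ++ [ip.2], ws.2) else (ws.1, ws.2 ++ [ip.2])) acc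
      = l.foldl (fun ws p => if q p then (ws.1 ++ [p], ws.2) else (ws.1, ws.2 ++ [p])) acc := by
  induction l generalizing s acc with
  | nil => simp [PySem.List.enumerate]
  | cons x t ih =>
    rw [PySem.List.enumerate_cons]
    simp only [List.foldl_cons]
    have h0 := h 0 (by simp)
    simp only [Nat.cast_zero, Int.add_zero, List.getElem_cons_zero] at h0
    have hx : (if F s = true then (acc.1 ++ [x], acc.2) else (acc.1, acc.2 ++ [x]))
        = (if q x then (acc.1 ++ [x], acc.2) else (acc.1, acc.2 ++ [x])) := by
      by_cases hq : q x
      · rw [if_pos hq, if_pos (h0.mpr hq)]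
      · rw [if_neg hq, if_neg (fun hF => hq (h0.mp hF))]
    rw [hx]
    apply ih
    intro k hk
    have hh := h (k + 1) (by simpa using Nat.succ_lt_succ hk)
    simp only [Nat.cast_add, Nat.cast_one, List.getElem_cons_succ] at hh
    rw [show s + 1 + (k : Int) = s + ((k : Int) + 1) by ring]
    exact hh

-- characterization of one column's group dict (built from empty over enumerate combined 0)
theorem group_eq (combined : List (Int × Int)) (k : Int × Int → Int) (v : Int) :
    (((PySem.List.enumerate combined 0).foldl
        (fun d ip => d.modify (k ip.2) [] (· ++ [ip.1]))
        (PySem.Dict.empty : PySem.Dict Int (List Int))).getD v [])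
      = ((PySem.List.enumerate combined 0).filter (fun ip => k ip.2 == v)).map (·.1) := by
  rw [group_getD]
  simp

theorem mem_group_iff (combined : List (Int × Int)) (k : Int × Int → Int) (v : Int) (j : Int) :
    j ∈ (((PySem.List.enumerate combined 0).foldl
        (fun d ip => d.modify (k ip.2) [] (· ++ [ip.1]))
        (PySem.Dict.empty : PySem.Dict Int (List Int))).getD v [])
      ↔ 0 ≤ j ∧ ∃ hm : j.toNat < combined.length, k combined[j.toNat] = v := by
  rw [group_eq]
  simp only [List.mem_map, List.mem_filter, PySem.List.mem_enumerate_iff]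
  constructor
  · rintro ⟨ip, ⟨⟨m, hm, rfl⟩, hkv⟩, rfl⟩
    simp only [zero_add]
    refine ⟨by positivity, by simpa using hm, ?_⟩
    simpa using (by simpa using hkv : k combined[m] = v)
  · rintro ⟨h0, hm, hkv⟩
    exact ⟨((j.toNat : Int), combined[j.toNat]), ⟨⟨j.toNat, hm, by simp [h0]⟩,
      by simpa using hkv⟩, by omega⟩

theorem group_length (combined : List (Int × Int)) (k : Int × Int → Int) (v : Int) :
    (((PySem.List.enumerate combined 0).foldl
        (fun d ip => d.modify (k ip.2) [] (· ++ [ip.1]))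
        (PySem.Dict.empty : PySem.Dict Int (List Int))).getD v []).length
      = (combined.map k).count v := by
  rw [group_eq, List.length_map, ← List.countP_eq_length_filter]
  conv_rhs => rw [show combined = (PySem.List.enumerate combined 0).map (·.2) from
    (PySem.List.map_snd_enumerate combined 0).symm]
  rw [List.map_map, List.count, List.countP_map]
  rfl

-- the group dict's keys are exactly the column values, its keys are unique
theorem group_keys (combined : List (Int × Int)) (k : Int × Int → Int) :
    (((PySem.List.enumerate combined 0).foldl
        (fun d ip => d.modify (k ip.2) [] (· ++ [ip.1]))
        (PySem.Dict.empty : PySem.Dict Int (List Int))).keys)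
      = PySem.Set.ofList ((PySem.List.enumerate combined 0).map (fun ip => k ip.2)) := by
  rw [PySem.Dict.keys_foldl_modify_key]
  simp [PySem.Set.update_nil_left]

theorem group_keys_nodup (combined : List (Int × Int)) (k : Int × Int → Int) :
    (((PySem.List.enumerate combined 0).foldl
        (fun d ip => d.modify (k ip.2) [] (· ++ [ip.1]))
        (PySem.Dict.empty : PySem.Dict Int (List Int))).keys).Nodup := by
  apply PySem.Dict.nodup_keys_foldl_modify_key
  simp [PySem.Dict.keys_empty]

-- marking one column's groups: the flag at i becomes old flag OR "column value at i duplicated"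
theorem column_mark (combined : List (Int × Int)) (k : Int × Int → Int) (fl : List Bool)
    (i : Nat) (hi : i < combined.length) (hlen : fl.length = combined.length) :
    ((((PySem.List.enumerate combined 0).foldl
        (fun d ip => d.modify (k ip.2) [] (· ++ [ip.1]))
        (PySem.Dict.empty : PySem.Dict Int (List Int))).values).foldl
          (fun fl ps => if ps.length > 1 then ps.foldl (fun fl j => PySem.List.pySetD fl j true) fl else fl)
          fl).getD i false
      = (fl.getD i false || decide ((combined.map k).count (k combined[i]) > 1)) := by
  set G := (PySem.List.enumerate combined 0).foldl
      (fun d ip => d.modify (k ip.2) [] (· ++ [ip.1]))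
      (PySem.Dict.empty : PySem.Dict Int (List Int)) with hG
  have hvals : G.values = G.keys.map (fun v => G.getD v []) :=
    PySem.Dict.values_eq_map_keys G (group_keys_nodup combined k) []
  have hmem : ∀ ps ∈ G.values, ∀ j ∈ ps, 0 ≤ j ∧ j.toNat < fl.length := by
    intro ps hps j hj
    rw [hvals] at hps
    obtain ⟨v, _, rfl⟩ := List.mem_map.mp hps
    obtain ⟨h0, hm, _⟩ := (mem_group_iff combined k v j).mp hj
    exact ⟨h0, by omega⟩
  rw [markfold_getD _ _ _ hmem]
  congr 1
  rw [Bool.eq_iff_iff]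
  simp only [List.any_eq_true, Bool.and_eq_true, decide_eq_true_eq]
  constructor
  · rintro ⟨ps, hps, hgt, hin⟩
    rw [hvals] at hps
    obtain ⟨v, _, rfl⟩ := List.mem_map.mp hps
    obtain ⟨_, hm, hkv⟩ := (mem_group_iff combined k v (i : Int)).mp hin
    simp only [Int.toNat_natCast] at hkv
    rw [hG, group_length] at hgt
    rw [hkv]
    exact hgt
  · intro hgt
    refine ⟨G.getD (k combined[i]) [], ?_, by rw [hG, group_length]; exact hgt, ?_⟩
    · rw [hvals]
      apply List.mem_map_of_mem
      rw [hG, group_keys]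
      rw [PySem.Set.mem_ofList]
      exact List.mem_map.mpr ⟨((i : Int), combined[i]),
        (PySem.List.mem_enumerate_iff _ _ _).mpr ⟨i, hi, by simp⟩, rfl⟩
    · rw [mem_group_iff]
      exact ⟨by positivity, by simpa using hi, by simp⟩

-- ===== VERDICT (by name: the statement is the Claim_ definition above) =====
theorem check_weak_spec : Claim_equal_check_weak := by
  intro ordered strong _
  unfold Spec_check_weak check_weak check_weak_alt
  simp only [PySem.List.foldl_append_singleton_eq_map, List.nil_append]
  rw [PySem.List.foldl_prod_mk
    (f := fun (d : PySem.Dict Int (List Int)) (ip : Int × (Int × Int)) => d.modify ip.2.1 [] (· ++ [ip.1]))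
    (g := fun (d : PySem.Dict Int (List Int)) (ip : Int × (Int × Int)) => d.modify ip.2.2 [] (· ++ [ip.1]))]
  set cmb := strong ++ ordered with hc2
  set num1 := cmb.map Prod.fst with hn1
  set num2 := cmb.map Prod.snd with hn2
  set dup1 := num1.foldl (fun d v => if num1.count v > 1 then (if v ∈ d then d else d ++ [v]) else d) [] with hd1
  set dup2 := num2.foldl (fun d v => if num2.count v > 1 then (if v ∈ d then d else d ++ [v]) else d) [] with hd2
  set G1 := (PySem.List.enumerate cmb 0).foldl
      (fun d ip => d.modify ip.2.1 [] (· ++ [ip.1]))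
      (PySem.Dict.empty : PySem.Dict Int (List Int)) with hG1
  set G2 := (PySem.List.enumerate cmb 0).foldl
      (fun d ip => d.modify ip.2.2 [] (· ++ [ip.1]))
      (PySem.Dict.empty : PySem.Dict Int (List Int)) with hG2
  set flags1 := G1.values.foldl
      (fun fl ps => if ps.length > 1 then ps.foldl (fun fl j => PySem.List.pySetD fl j true) fl else fl)
      (List.replicate cmb.length false) with hf1
  set flags := G2.values.foldl
      (fun fl ps => if ps.length > 1 then ps.foldl (fun fl j => PySem.List.pySetD fl j true) fl else fl)
      flags1 with hf
  have hlen1 : flags1.length = cmb.length := by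
    rw [hf1, markfold_length, List.length_replicate]
  refine (split_enum cmb 0 ([], []) (fun idx => PySem.List.pyGetD flags idx false)
    (fun p => p.1 ∈ dup1 ∨ p.2 ∈ dup2) ?_).symm
  intro k hk
  simp only [zero_add]
  show PySem.List.pyGetD flags (k : Int) false = true ↔ _
  rw [PySem.List.pyGetD_natCast]
  rw [hf, column_mark cmb Prod.snd flags1 k hk hlen1]
  rw [hf1, column_mark cmb Prod.fst (List.replicate cmb.length false) k hk (List.length_replicate ..)]
  have hrep : (List.replicate cmb.length false).getD k false = false := by
    simp [List.getD_eq_getElem?_getD, hk]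
  rw [hrep]
  have m1 : cmb[k].1 ∈ num1 := by
    rw [hn1]; exact List.mem_map.mpr ⟨cmb[k], List.getElem_mem hk, rfl⟩
  have m2 : cmb[k].2 ∈ num2 := by
    rw [hn2]; exact List.mem_map.mpr ⟨cmb[k], List.getElem_mem hk, rfl⟩
  rw [hd1, hd2]
  simp only [Bool.false_or, Bool.or_eq_true, decide_eq_true_eq, dup_mem, List.not_mem_nil, false_or]
  rw [hn1, hn2]
  constructor
  · rintro (h | h)
    · exact Or.inl ⟨m1, h⟩
    · exact Or.inr ⟨m2, h⟩
  · rintro (⟨_, h⟩ | ⟨_, h⟩)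
    · exact Or.inl h
    · exact Or.inr h
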